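-- pv_equiv track=rewrite | github.com/deepakraaaj/FastMCP | src/tag_fastmcp/core/chat_service.py | _pending_sql_action
-- ===== SOURCE A (Python) =====
-- from typing import Any
--
-- def _pending_sql_action(history: list[dict[str, Any]]) -> dict[str, Any] | None:
--     pending: dict[str, Any] | None = None
--     for event in history:
--         event_type = event.get("type")
--         if event_type == "pending_sql_action":
--             pending = event
--         elif event_type in {"pending_sql_cleared", "pending_sql_executed"}:
--             pending = None
--     return pending
-- ===== SOURCE B (Python) =====
-- from typing import Any
--
-- def _pending_sql_action(history: list[dict[str, Any]]) -> dict[str, Any] | None: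
--     for event in reversed(history):
--         event_type = event.get("type")
--         if event_type == "pending_sql_action":
--             return event
--         if event_type in ("pending_sql_cleared", "pending_sql_executed"):
--             return None
--     return None
-- ===== Notes on version B (the rewrite author's own statement) =====
-- stated objective: alternative
-- what changed: B scans the history backwards and returns at the first decisive event (pending/cleared/executed) instead of A's forward pass that maintains a running variable over the whole list.
import Mathlib
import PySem

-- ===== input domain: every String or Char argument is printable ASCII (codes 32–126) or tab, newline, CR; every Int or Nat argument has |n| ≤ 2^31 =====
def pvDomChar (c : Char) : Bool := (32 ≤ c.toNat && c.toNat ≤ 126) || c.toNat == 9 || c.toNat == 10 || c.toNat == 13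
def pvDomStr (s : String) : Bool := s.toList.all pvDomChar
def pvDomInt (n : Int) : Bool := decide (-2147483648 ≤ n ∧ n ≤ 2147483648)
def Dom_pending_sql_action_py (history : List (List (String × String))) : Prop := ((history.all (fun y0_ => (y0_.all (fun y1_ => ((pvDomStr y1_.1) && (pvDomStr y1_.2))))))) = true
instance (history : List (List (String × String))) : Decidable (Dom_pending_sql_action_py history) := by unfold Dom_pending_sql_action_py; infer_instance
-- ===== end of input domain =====

-- B scans the history backwards and returns at the first decisive event instead of A's
-- whole-list forward pass with a running variable; return values are proved equal on all inputs.

-- ===== PORT A =====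
def pending_sql_action_py (history : List (List (String × String))) : Option (List (String × String)) :=
  history.foldl (fun pending event =>
    let event_type := PySem.Dict.get? (PySem.Dict.mk event) "type"
    if event_type = some "pending_sql_action" then some event
    else if event_type = some "pending_sql_cleared" ∨ event_type = some "pending_sql_executed" then none
    else pending) none

-- ===== PORT B =====
def pending_sql_action_py_alt_go : List (List (String × String)) → Option (List (String × String))
  | [] => none
  | event :: rest =>
    let event_type := PySem.Dict.get? (PySem.Dict.mk event) "type"
    if event_type = some "pending_sql_action" then some event
    else if event_type = some "pending_sql_cleared" ∨ event_type = some "pending_sql_executed" then none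
    else pending_sql_action_py_alt_go rest

def pending_sql_action_py_alt (history : List (List (String × String))) : Option (List (String × String)) :=
  pending_sql_action_py_alt_go history.reverse

-- ===== PRECONDITION & SPEC =====
def Spec_pending_sql_action_py (history : List (List (String × String))) (out : Option (List (String × String))) : Prop := out = pending_sql_action_py_alt history
instance (history : List (List (String × String))) (out : Option (List (String × String))) : Decidable (Spec_pending_sql_action_py history out) := by unfold Spec_pending_sql_action_py; infer_instance

-- ===== CLAIM (what is proved, stated in full; the proofs are below) =====
def Claim_equal_pending_sql_action_py : Prop := ∀ (history : List (List (String × String))), Dom_pending_sql_action_py history → Spec_pending_sql_action_py history (pending_sql_action_py history)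

-- ===== LEMMAS AND PROOFS =====

theorem pending_sql_action_eq (history : List (List (String × String))) :
    pending_sql_action_py history = pending_sql_action_py_alt history := by
  unfold pending_sql_action_py pending_sql_action_py_alt
  induction history using List.reverseRecOn with
  | nil => rfl
  | append_singleton l e ih =>
    rw [List.foldl_append, List.reverse_append]
    simp only [List.foldl_cons, List.foldl_nil, List.reverse_cons, List.reverse_nil,
      List.nil_append, List.cons_append, pending_sql_action_py_alt_go]
    split_ifs with h1 h2
    · rfl
    · rfl
    · exact ih

-- ===== VERDICT (by name: the statement is the Claim_ definition above) =====
theorem pending_sql_action_py_spec : Claim_equal_pending_sql_action_py := by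
  intro history _
  exact pending_sql_action_eq history
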